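-- pv_equiv track=rewrite | github.com/Navoddakshine/Robotics | color.py | identifying_color
-- ===== SOURCE A (Python) =====
-- def identifying_color(red_frequency, green_frequency, blue_frequency, black_frequency):
--     color_ranges = {
--         'Red': {
--             'red_min': 100, 'red_max': 300,
--             'green_min': 300, 'green_max': 500,
--             'blue_min': 300, 'blue_max': 500,
--             'black_max': 200
--         },
--         'Green': {
--             'red_min': 520, 'red_max': 700,
--             'green_min': 490, 'green_max': 700,
--             'blue_min': 460, 'blue_max': 680,
--             'black_max': 200
--         },
--         'Blue': {
--             'red_min': 260, 'red_max': 300,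
--             'green_min': 370, 'green_max': 450,
--             'blue_min': 250, 'blue_max': 390,
--             'black_max': 200
--         },
--         'Black': {
--             'red_min': 600, 'red_max': 800,
--             'green_min': 600, 'green_max': 800,
--             'blue_min': 600, 'blue_max': 800,
--             'black_max': 300
--         }
--     }
--
--     for color, ranges in color_ranges.items():
--         if ('red_min' not in ranges or red_frequency >= ranges['red_min']) and \
--            ('red_max' not in ranges or red_frequency <= ranges['red_max']) and \
--            ('green_min' not in ranges or green_frequency >= ranges['green_min']) and \
--            ('green_max' not in ranges or green_frequency <= ranges['green_max']) and \
--            ('blue_min' not in ranges or blue_frequency >= ranges['blue_min']) and \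
--            ('blue_max' not in ranges or blue_frequency <= ranges['blue_max']) and \
--            ('black_max' not in ranges or black_frequency <= ranges['black_max']):
--             return color
--
--     return 'Unknown'
-- ===== SOURCE B (Python) =====
-- def identifying_color(red_frequency, green_frequency, blue_frequency, black_frequency):
--     # Bit-parallel classification: per channel, build a 4-bit mask of the colors
--     # (bit i = color i in Red,Green,Blue,Black order) whose range admits that
--     # channel's value; intersect the masks; the lowest set bit names the color.
--     names = ['Red', 'Green', 'Blue', 'Black']
--
--     def band_mask(v, bands):
--         m = 0
--         for i, (lo, hi) in enumerate(bands):
--             if lo <= v <= hi: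
--                 m |= 1 << i
--         return m
--
--     def cap_mask(v, caps):
--         m = 0
--         for i, hi in enumerate(caps):
--             if v <= hi:
--                 m |= 1 << i
--         return m
--
--     m = (band_mask(red_frequency, [(100, 300), (520, 700), (260, 300), (600, 800)])
--          & band_mask(green_frequency, [(300, 500), (490, 700), (370, 450), (600, 800)])
--          & band_mask(blue_frequency, [(300, 500), (460, 680), (250, 390), (600, 800)])
--          & cap_mask(black_frequency, [200, 200, 200, 300]))
--
--     for i, name in enumerate(names):
--         if m >> i & 1:
--             return name
--     return 'Unknown'
-- ===== Notes on version B (the rewrite author's own statement) =====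
-- stated objective: alternative
-- what changed: Replaced the per-color loop over a dict of range dicts (each iteration testing all four channels) by a bit-parallel scheme: each channel independently builds a 4-bit mask of the colors whose range admits it, the four masks are intersected with &, and the lowest set bit of the intersection names the color.
import Mathlib
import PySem

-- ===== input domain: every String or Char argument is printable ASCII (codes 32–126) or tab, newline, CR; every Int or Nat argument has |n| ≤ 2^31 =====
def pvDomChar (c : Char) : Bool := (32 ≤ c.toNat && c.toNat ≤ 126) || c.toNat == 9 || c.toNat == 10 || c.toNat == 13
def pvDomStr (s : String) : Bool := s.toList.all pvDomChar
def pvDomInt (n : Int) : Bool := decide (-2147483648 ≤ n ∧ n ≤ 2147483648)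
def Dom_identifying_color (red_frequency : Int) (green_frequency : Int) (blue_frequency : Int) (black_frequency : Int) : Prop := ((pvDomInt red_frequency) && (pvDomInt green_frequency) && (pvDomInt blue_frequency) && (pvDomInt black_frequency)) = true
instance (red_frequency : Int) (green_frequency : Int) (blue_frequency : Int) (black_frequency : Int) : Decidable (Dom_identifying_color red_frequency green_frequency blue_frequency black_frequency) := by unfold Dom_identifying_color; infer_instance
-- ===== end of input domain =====

/-
  B replaces A's per-color loop over a dict-of-dicts table by a bit-parallel scheme:
  each channel builds a 4-bit mask of the colors admitting it, the masks are
  intersected, and the lowest set bit names the color (objective: alternative).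
-/


-- ===== PORT A =====
-- A's color_ranges table: a dict of dicts, kept as in the Python.
def pvColorRanges : PySem.Dict String (PySem.Dict String Int) :=
  PySem.Dict.ofList
    [ ("Red",   PySem.Dict.ofList [("red_min", 100), ("red_max", 300), ("green_min", 300), ("green_max", 500), ("blue_min", 300), ("blue_max", 500), ("black_max", 200)])
    , ("Green", PySem.Dict.ofList [("red_min", 520), ("red_max", 700), ("green_min", 490), ("green_max", 700), ("blue_min", 460), ("blue_max", 680), ("black_max", 200)])
    , ("Blue",  PySem.Dict.ofList [("red_min", 260), ("red_max", 300), ("green_min", 370), ("green_max", 450), ("blue_min", 250), ("blue_max", 390), ("black_max", 200)])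
    , ("Black", PySem.Dict.ofList [("red_min", 600), ("red_max", 800), ("green_min", 600), ("green_max", 800), ("blue_min", 600), ("blue_max", 800), ("black_max", 300)]) ]

-- the 'for color, ranges in color_ranges.items(): if ...: return color' loop; ranges['k'] is
-- looked up with getD 0, exact here because each lookup is guarded by the 'k not in ranges' test.
def pvFindColor (red_frequency green_frequency blue_frequency black_frequency : Int) :
    List (String × PySem.Dict String Int) → String
  | [] => "Unknown"
  | (color, ranges) :: rest =>
    if ((!(ranges.contains "red_min") || decide (red_frequency ≥ ranges.getD "red_min" 0)) &&
        (!(ranges.contains "red_max") || decide (red_frequency ≤ ranges.getD "red_max" 0)) &&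
        (!(ranges.contains "green_min") || decide (green_frequency ≥ ranges.getD "green_min" 0)) &&
        (!(ranges.contains "green_max") || decide (green_frequency ≤ ranges.getD "green_max" 0)) &&
        (!(ranges.contains "blue_min") || decide (blue_frequency ≥ ranges.getD "blue_min" 0)) &&
        (!(ranges.contains "blue_max") || decide (blue_frequency ≤ ranges.getD "blue_max" 0)) &&
        (!(ranges.contains "black_max") || decide (black_frequency ≤ ranges.getD "black_max" 0))) = true
    then color
    else pvFindColor red_frequency green_frequency blue_frequency black_frequency rest

def identifying_color (red_frequency : Int) (green_frequency : Int) (blue_frequency : Int) (black_frequency : Int) : String :=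
  pvFindColor red_frequency green_frequency blue_frequency black_frequency pvColorRanges.items

-- ===== PORT B =====
-- band_mask: bit i set iff interval i contains v (the enumerate loop, as a foldl)
-- enumerate indices are ≥ 0, so `.toNat` on them is exact
def pvBandMask (v : Int) (bands : List (Int × Int)) : Nat :=
  (PySem.List.enumerate bands).foldl
    (fun m p => if (decide (p.2.1 ≤ v) && decide (v ≤ p.2.2)) = true then m ||| (1 <<< p.1.toNat) else m) 0

-- cap_mask: bit i set iff v ≤ caps[i]
def pvCapMask (v : Int) (caps : List Int) : Nat :=
  (PySem.List.enumerate caps).foldl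
    (fun m p => if decide (v ≤ p.2) = true then m ||| (1 <<< p.1.toNat) else m) 0

-- 'for i, name in enumerate(names): if m >> i & 1: return name' / 'return "Unknown"'
def pvPickColor (m : Nat) : List (Int × String) → String
  | [] => "Unknown"
  | (i, name) :: rest => if ((m >>> i.toNat) &&& 1) ≠ 0 then name else pvPickColor m rest

def identifying_color_alt (red_frequency : Int) (green_frequency : Int) (blue_frequency : Int) (black_frequency : Int) : String :=
  let m := pvBandMask red_frequency   [(100, 300), (520, 700), (260, 300), (600, 800)] &&&
           pvBandMask green_frequency [(300, 500), (490, 700), (370, 450), (600, 800)] &&&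
           pvBandMask blue_frequency  [(300, 500), (460, 680), (250, 390), (600, 800)] &&&
           pvCapMask black_frequency  [200, 200, 200, 300]
  pvPickColor m (PySem.List.enumerate ["Red", "Green", "Blue", "Black"])

-- ===== PRECONDITION & SPEC =====
def Spec_identifying_color (red_frequency : Int) (green_frequency : Int) (blue_frequency : Int) (black_frequency : Int) (out : String) : Prop := out = identifying_color_alt red_frequency green_frequency blue_frequency black_frequency
instance (red_frequency : Int) (green_frequency : Int) (blue_frequency : Int) (black_frequency : Int) (out : String) : Decidable (Spec_identifying_color red_frequency green_frequency blue_frequency black_frequency out) := by unfold Spec_identifying_color; infer_instance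

-- ===== CLAIM =====
def Claim_equal_identifying_color : Prop := ∀ (red_frequency : Int) (green_frequency : Int) (blue_frequency : Int) (black_frequency : Int), Dom_identifying_color red_frequency green_frequency blue_frequency black_frequency → Spec_identifying_color red_frequency green_frequency blue_frequency black_frequency (identifying_color red_frequency green_frequency blue_frequency black_frequency)

-- ===== LEMMAS AND PROOFS =====
-- a 4-bit mask written from its four boolean bits
def pvNum (b0 b1 b2 b3 : Bool) : Nat :=
  (if b0 then 1 else 0) ||| (if b1 then 2 else 0) ||| (if b2 then 4 else 0) ||| (if b3 then 8 else 0)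

theorem pvBandMask_four (v l0 h0 l1 h1 l2 h2 l3 h3 : Int) :
    pvBandMask v [(l0, h0), (l1, h1), (l2, h2), (l3, h3)] =
      pvNum (decide (l0 ≤ v) && decide (v ≤ h0)) (decide (l1 ≤ v) && decide (v ≤ h1))
            (decide (l2 ≤ v) && decide (v ≤ h2)) (decide (l3 ≤ v) && decide (v ≤ h3)) := by
  simp only [pvBandMask, pvNum, PySem.List.enumerate, List.foldl]
  split_ifs <;> simp_all

theorem pvCapMask_four (v c0 c1 c2 c3 : Int) :
    pvCapMask v [c0, c1, c2, c3] =
      pvNum (decide (v ≤ c0)) (decide (v ≤ c1)) (decide (v ≤ c2)) (decide (v ≤ c3)) := by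
  simp only [pvCapMask, pvNum, PySem.List.enumerate, List.foldl]
  split_ifs <;> simp_all

theorem pvNum_land (a0 a1 a2 a3 b0 b1 b2 b3 : Bool) :
    pvNum a0 a1 a2 a3 &&& pvNum b0 b1 b2 b3 =
      pvNum (a0 && b0) (a1 && b1) (a2 && b2) (a3 && b3) := by
  cases a0 <;> cases a1 <;> cases a2 <;> cases a3 <;>
    cases b0 <;> cases b1 <;> cases b2 <;> cases b3 <;> rfl

theorem pvPickColor_num (b0 b1 b2 b3 : Bool) :
    pvPickColor (pvNum b0 b1 b2 b3) (PySem.List.enumerate ["Red", "Green", "Blue", "Black"]) =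
      if b0 then "Red" else if b1 then "Green" else if b2 then "Blue"
      else if b3 then "Black" else "Unknown" := by
  cases b0 <;> cases b1 <;> cases b2 <;> cases b3 <;> rfl

-- ===== VERDICT =====
theorem identifying_color_spec : Claim_equal_identifying_color := by
  intro r g b k _
  show identifying_color r g b k = identifying_color_alt r g b k
  rw [identifying_color_alt, pvBandMask_four, pvBandMask_four, pvBandMask_four, pvCapMask_four,
      pvNum_land, pvNum_land, pvNum_land, pvPickColor_num]
  -- A's loop over the closed table evaluates (by computation) to a four-way if-chain
  have hA : identifying_color r g b k =
      (if (decide (r ≥ 100) && decide (r ≤ 300) && decide (g ≥ 300) && decide (g ≤ 500) &&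
           decide (b ≥ 300) && decide (b ≤ 500) && decide (k ≤ 200)) = true then "Red"
       else if (decide (r ≥ 520) && decide (r ≤ 700) && decide (g ≥ 490) && decide (g ≤ 700) &&
           decide (b ≥ 460) && decide (b ≤ 680) && decide (k ≤ 200)) = true then "Green"
       else if (decide (r ≥ 260) && decide (r ≤ 300) && decide (g ≥ 370) && decide (g ≤ 450) &&
           decide (b ≥ 250) && decide (b ≤ 390) && decide (k ≤ 200)) = true then "Blue"
       else if (decide (r ≥ 600) && decide (r ≤ 800) && decide (g ≥ 600) && decide (g ≤ 800) &&
           decide (b ≥ 600) && decide (b ≤ 800) && decide (k ≤ 300)) = true then "Black"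
       else "Unknown") := rfl
  rw [hA]
  simp only [Bool.and_eq_true, decide_eq_true_eq, ge_iff_le]
  split_ifs <;> first | rfl | omega
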